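-- pv_equiv track=rewrite | github.com/LukaAhac/AdventOfCode | Advent_of_Code_2024/Solutions/day2.py | isReportValid
-- ===== SOURCE A (Python) =====
-- def isReportValid(report):
--     if not (report == sorted(report) or report == sorted(report, reverse=True)):
--         return False
--
--     for i in range(0, len(report) - 1):
--         subtraction = report[i] - report[i + 1]
--         if not 1 <= abs(subtraction) <= 3:
--             return False
--
--     return True
-- ===== SOURCE B (Python) =====
-- def isReportValid(report):
--     diffs = [b - a for a, b in zip(report, report[1:])]
--     return all(1 <= d <= 3 for d in diffs) or all(-3 <= d <= -1 for d in diffs)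
-- ===== Notes on version B (the rewrite author's own statement) =====
-- stated objective: alternative
-- what changed: Replaced the sort-and-compare monotonicity test plus an index loop by one linear pass over adjacent differences, checking they are each between 1 and 3, or each between -3 and -1.
import Mathlib
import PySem

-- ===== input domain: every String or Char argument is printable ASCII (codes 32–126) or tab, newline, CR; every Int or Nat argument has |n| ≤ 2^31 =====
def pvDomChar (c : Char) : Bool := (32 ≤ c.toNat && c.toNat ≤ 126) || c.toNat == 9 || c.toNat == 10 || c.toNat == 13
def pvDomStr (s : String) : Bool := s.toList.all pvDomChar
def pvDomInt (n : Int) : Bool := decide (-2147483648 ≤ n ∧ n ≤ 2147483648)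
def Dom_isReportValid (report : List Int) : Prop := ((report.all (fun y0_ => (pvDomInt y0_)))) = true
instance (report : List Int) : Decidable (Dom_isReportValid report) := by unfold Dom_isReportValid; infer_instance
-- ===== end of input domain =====

-- B replaces A's sort-and-compare monotonicity test plus index loop by one linear
-- pass over adjacent differences (each between 1 and 3, or each between -3 and -1); objective: alternative.

-- ===== PORT A =====
def isReportValid (report : List Int) : Bool :=
  if !(report == PySem.List.sorted report (fun x => x) false
       || report == PySem.List.sorted report (fun x => x) true) then
    false
  else
    (PySem.List.pyRange 0 ((report.length : Int) - 1) 1).all (fun i =>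
      let subtraction := PySem.List.pyGetD report i 0 - PySem.List.pyGetD report (i + 1) 0
      decide (1 ≤ |subtraction| ∧ |subtraction| ≤ 3))

-- ===== PORT B =====
def isReportValid_alt (report : List Int) : Bool :=
  let diffs := (report.zip (PySem.List.slice report (some 1) none)).map (fun p => p.2 - p.1)
  diffs.all (fun d => decide (1 ≤ d ∧ d ≤ 3)) || diffs.all (fun d => decide (-3 ≤ d ∧ d ≤ -1))

-- ===== PRECONDITION & SPEC =====
def Spec_isReportValid (report : List Int) (out : Bool) : Prop := out = isReportValid_alt report
instance (report : List Int) (out : Bool) : Decidable (Spec_isReportValid report out) := by unfold Spec_isReportValid; infer_instance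

-- ===== CLAIM (what is proved, stated in full; the proofs are below) =====
def Claim_equal_isReportValid : Prop := ∀ (report : List Int), Dom_isReportValid report → Spec_isReportValid report (isReportValid report)

-- ===== LEMMAS AND PROOFS =====

-- A's index loop over range(len-1) is the all over adjacent pairs.
theorem adjAllNat (P : Int → Int → Bool) :
    ∀ xs : List Int, (List.range (xs.length - 1)).all (fun i => P (xs.getD i 0) (xs.getD (i + 1) 0))
      = (xs.zip xs.tail).all (fun p => P p.1 p.2) := by
  intro xs
  induction xs with
  | nil => rfl
  | cons x t ih =>
    cases t with
    | nil => rfl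
    | cons y t' =>
      have h := ih
      simp only [List.length_cons, Nat.add_sub_cancel, List.range_succ_eq_map,
        List.all_cons, List.all_map, List.zip_cons_cons, List.tail_cons] at h ⊢
      simp only [List.getD_cons_zero, List.getD_cons_succ, Function.comp_def] at h ⊢
      rw [h]

theorem adjAll (P : Int → Int → Bool) (xs : List Int) :
    (PySem.List.pyRange 0 ((xs.length : Int) - 1) 1).all
        (fun i => P (PySem.List.pyGetD xs i 0) (PySem.List.pyGetD xs (i + 1) 0))
      = (xs.zip xs.tail).all (fun p => P p.1 p.2) := by
  rw [← adjAllNat P xs, PySem.List.pyRange_one, List.all_map]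
  have hlen : (((xs.length : Int) - 1 - 0).toNat) = xs.length - 1 := by omega
  rw [hlen, Bool.eq_iff_iff]
  simp only [List.all_eq_true, List.mem_range]
  refine forall_congr' (fun i => imp_congr_right (fun hi => ?_))
  have h1 : ((0 : Int) + (i : Int)) = ((i : Nat) : Int) := by ring
  have h2 : ((i : Int) + 1) = (((i + 1 : Nat)) : Int) := by push_cast; ring
  simp only [Function.comp_def, h1, h2, PySem.List.pyGetD_natCast]

-- zip-tail all ↔ IsChain
theorem zipAll_iff_isChain (R : Int → Int → Prop) [DecidableRel R] :
    ∀ xs : List Int, ((xs.zip xs.tail).all (fun p => decide (R p.1 p.2)) = true ↔ List.IsChain R xs) := by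
  intro xs
  induction xs with
  | nil => simp
  | cons x t ih =>
    cases t with
    | nil => simp
    | cons y t' =>
      simp only [List.tail_cons, List.zip_cons_cons, List.all_cons, Bool.and_eq_true,
        decide_eq_true_iff, List.isChain_cons_cons] at *
      exact and_congr Iff.rfl ih

-- "report == sorted(report)" ↔ adjacent pairs nondecreasing (and the reverse version)
theorem eq_sorted_iff (xs : List Int) :
    (xs = PySem.List.sorted xs (fun x => x) false) ↔
      ((xs.zip xs.tail).all (fun p => decide (p.1 ≤ p.2)) = true) := by
  rw [zipAll_iff_isChain (· ≤ ·) xs, List.isChain_iff_pairwise]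
  constructor
  · intro h
    have := PySem.List.sorted_pairwise xs (fun x => x); rw [← h] at this; exact this
  · intro h
    exact (PySem.List.sorted_eq_self_of_pairwise xs (fun x => x) h).symm

theorem eq_sorted_rev_iff (xs : List Int) :
    (xs = PySem.List.sorted xs (fun x => x) true) ↔
      ((xs.zip xs.tail).all (fun p => decide (p.2 ≤ p.1)) = true) := by
  rw [zipAll_iff_isChain (fun a b => b ≤ a) xs, List.isChain_iff_pairwise]
  constructor
  · intro h
    have := PySem.List.sorted_pairwise_rev xs (fun x => x); rw [← h] at this; exact this
  · intro h
    exact (PySem.List.sorted_rev_eq_self_of_pairwise xs (fun x => x) h).symm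

-- ===== VERDICT (by name: the statement is the Claim_ definition above) =====
theorem isReportValid_spec : Claim_equal_isReportValid := by
  intro report _
  unfold Spec_isReportValid isReportValid isReportValid_alt
  rw [PySem.List.slice_from_one,
      adjAll (fun a b => decide (1 ≤ |a - b| ∧ |a - b| ≤ 3)) report]
  have hif : ∀ c d : Bool, (if (!c) = true then false else d) = (c && d) := by decide
  rw [hif, Bool.eq_iff_iff]
  simp only [Bool.and_eq_true, Bool.or_eq_true, beq_iff_eq, eq_sorted_iff, eq_sorted_rev_iff,
    List.all_map, List.all_eq_true, Function.comp_def, decide_eq_true_iff]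
  constructor
  · rintro ⟨h | h, hd⟩
    · left; intro p hp; have := h p hp; have := hd p hp; (rcases abs_cases (p.1 - p.2) with ⟨h1, h2⟩ | ⟨h1, h2⟩ <;> omega)
    · right; intro p hp; have := h p hp; have := hd p hp; (rcases abs_cases (p.1 - p.2) with ⟨h1, h2⟩ | ⟨h1, h2⟩ <;> omega)
  · rintro (h | h)
    · exact ⟨Or.inl fun p hp => by have := h p hp; (rcases abs_cases (p.1 - p.2) with ⟨h1, h2⟩ | ⟨h1, h2⟩ <;> omega), fun p hp => by have := h p hp; (rcases abs_cases (p.1 - p.2) with ⟨h1, h2⟩ | ⟨h1, h2⟩ <;> omega)⟩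
    · exact ⟨Or.inr fun p hp => by have := h p hp; (rcases abs_cases (p.1 - p.2) with ⟨h1, h2⟩ | ⟨h1, h2⟩ <;> omega), fun p hp => by have := h p hp; (rcases abs_cases (p.1 - p.2) with ⟨h1, h2⟩ | ⟨h1, h2⟩ <;> omega)⟩
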